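-- pv_equiv track=rewrite | github.com/yantavares/simulador-redes-TR1 | transmissor.py | bytes_insertion_framing
-- ===== SOURCE A (Python) =====
-- def bytes_insertion_framing(bits_array, max_frame_size): # max_frame_size is the number of ****bytes**** in a frame
--     """Return a matrix of frames, each frame is a list of strings of 8 bits"""
--     frames_matrix = []
--     bytes_list = [''.join(map(str, bits_array[i:i+8])) for i in range(0, len(bits_array), 8)] # Bytes list is a array of strings of 8 bits
--     byte_flag = "01111110"
--
--     while bytes_list:
--         frame_size = min(len(bytes_list), max_frame_size-2)  # -2 for the flags
--         frame = [byte_flag] + bytes_list[:frame_size] + [byte_flag]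
--         frames_matrix.append(frame)
--         bytes_list = bytes_list[frame_size:]
--
--     return frames_matrix
-- ===== SOURCE B (Python) =====
-- def bytes_insertion_framing(bits_array, max_frame_size): # max_frame_size is the number of ****bytes**** in a frame
--     """Return a matrix of frames, each frame is a list of strings of 8 bits"""
--     byte_flag = "01111110"
--     bit_strs = [str(b) for b in bits_array]
--     bytes_list = [''.join(bit_strs[i:i+8]) for i in range(0, len(bit_strs), 8)]
--     if not bytes_list:
--         return []
--     step = max_frame_size - 2
--     return [[byte_flag] + bytes_list[s:s+step] + [byte_flag]
--             for s in range(0, len(bytes_list), step)]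
-- ===== Notes on version B (the rewrite author's own statement) =====
-- stated objective: alternative
-- what changed: Replaces A's while-loop that destructively re-slices the remaining bytes list frame by frame with a single comprehension indexing each frame by its start position.
import Mathlib
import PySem

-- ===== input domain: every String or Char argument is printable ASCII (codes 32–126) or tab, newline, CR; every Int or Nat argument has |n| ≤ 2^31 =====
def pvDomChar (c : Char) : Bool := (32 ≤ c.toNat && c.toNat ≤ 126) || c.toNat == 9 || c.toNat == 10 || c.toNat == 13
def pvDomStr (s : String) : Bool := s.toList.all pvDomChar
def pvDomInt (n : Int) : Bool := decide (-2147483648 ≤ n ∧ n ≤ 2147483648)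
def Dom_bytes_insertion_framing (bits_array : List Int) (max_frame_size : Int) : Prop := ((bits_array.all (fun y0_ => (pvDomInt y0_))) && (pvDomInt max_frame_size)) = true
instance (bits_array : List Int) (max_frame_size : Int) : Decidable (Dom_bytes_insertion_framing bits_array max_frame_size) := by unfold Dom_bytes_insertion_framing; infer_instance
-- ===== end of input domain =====

-- B replaces A's while-loop that re-slices the remaining bytes list each frame with a
-- single pass mapping over the frame start positions.


-- ===== PORT A =====
def pvByteFlag : String := "01111110"

-- the 'while bytes_list:' loop; fuel = initial bytes_list length (each iteration drops
-- ≥ 1 byte whenever max_frame_size ≥ 3, the domain Pre_ admits)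
def pvLoopA : Nat → List String → Int → List (List String)
  | 0, _, _ => []
  | fuel + 1, bytes_list, max_frame_size =>
    if bytes_list.isEmpty then []
    else
      let frame_size : Int := min (bytes_list.length : Int) (max_frame_size - 2)
      let frame := [pvByteFlag] ++ PySem.List.slice bytes_list none (some frame_size) ++ [pvByteFlag]
      frame :: pvLoopA fuel (PySem.List.slice bytes_list (some frame_size) none) max_frame_size

def bytes_insertion_framing (bits_array : List Int) (max_frame_size : Int) : List (List String) :=
  let bytes_list := (PySem.List.pyRange 0 (bits_array.length : Int) 8).map
    (fun i => PySem.Str.join "" ((PySem.List.slice bits_array (some i) (some (i + 8))).map PySem.Int.toStr))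
  pvLoopA bytes_list.length bytes_list max_frame_size

-- ===== PORT B =====
def bytes_insertion_framing_alt (bits_array : List Int) (max_frame_size : Int) : List (List String) :=
  let bit_strs := bits_array.map PySem.Int.toStr
  let bytes_list := (PySem.List.pyRange 0 (bit_strs.length : Int) 8).map
    (fun i => PySem.Str.join "" (PySem.List.slice bit_strs (some i) (some (i + 8))))
  if bytes_list.isEmpty then []
  else
    let step := max_frame_size - 2
    (PySem.List.pyRange 0 (bytes_list.length : Int) step).map
      (fun s => pvByteFlag :: PySem.List.slice bytes_list (some s) (some (s + step)) ++ [pvByteFlag])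

-- ===== PRECONDITION & SPEC =====
-- Pre_ excludes only the inputs on which A never returns: a nonempty bits_array with
-- max_frame_size ≤ 2 makes A's while-loop strip 0 (or a negative number of) bytes per
-- iteration, so it loops forever.
def Pre_bytes_insertion_framing (bits_array : List Int) (max_frame_size : Int) : Prop :=
  bits_array = [] ∨ 3 ≤ max_frame_size
instance (bits_array : List Int) (max_frame_size : Int) : Decidable (Pre_bytes_insertion_framing bits_array max_frame_size) := by unfold Pre_bytes_insertion_framing; infer_instance

def pvWitness_bytes_insertion_framing : List Int × Int := ([0, 1, 1, 1, 1, 1, 1, 0, 1], 3)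

def Spec_bytes_insertion_framing (bits_array : List Int) (max_frame_size : Int) (out : List (List String)) : Prop := out = bytes_insertion_framing_alt bits_array max_frame_size
instance (bits_array : List Int) (max_frame_size : Int) (out : List (List String)) : Decidable (Spec_bytes_insertion_framing bits_array max_frame_size out) := by unfold Spec_bytes_insertion_framing; infer_instance

-- ===== CLAIM (what is proved, stated in full; the proofs are below) =====
def Claim_equal_bytes_insertion_framing : Prop := ∀ (bits_array : List Int) (max_frame_size : Int), Dom_bytes_insertion_framing bits_array max_frame_size → Pre_bytes_insertion_framing bits_array max_frame_size → Spec_bytes_insertion_framing bits_array max_frame_size (bytes_insertion_framing bits_array max_frame_size)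

-- ===== LEMMAS AND PROOFS =====

-- reference framing: peel frames of t+1 bytes off the front
def pvFramesN (t : Nat) (xs : List String) : List (List String) :=
  match xs with
  | [] => []
  | x :: rest => (pvByteFlag :: x :: rest.take t ++ [pvByteFlag]) :: pvFramesN t (rest.drop t)
termination_by xs.length
decreasing_by simp

lemma pv_framesN_nil (t : Nat) : pvFramesN t [] = [] := by
  rw [pvFramesN.eq_def]

lemma pv_framesN_cons (t : Nat) (x : String) (rest : List String) :
    pvFramesN t (x :: rest)
      = (pvByteFlag :: x :: rest.take t ++ [pvByteFlag]) :: pvFramesN t (rest.drop t) := by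
  rw [pvFramesN.eq_def]

lemma pv_take_min_length {α : Type} (xs : List α) (k : Nat) :
    xs.take (min xs.length k) = xs.take k := by
  rcases le_total xs.length k with h | h
  · rw [min_eq_left h, List.take_length, List.take_of_length_le h]
  · rw [min_eq_right h]

lemma pv_drop_min_length {α : Type} (xs : List α) (k : Nat) :
    xs.drop (min xs.length k) = xs.drop k := by
  rcases le_total xs.length k with h | h
  · rw [min_eq_left h, List.drop_length, Eq.symm (List.drop_eq_nil_of_le h)]
  · rw [min_eq_right h]

lemma pvLoopA_eq_framesN (fuel : Nat) :
    ∀ (xs : List String) (mfs : Int), 3 ≤ mfs → xs.length ≤ fuel →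
      pvLoopA fuel xs mfs = pvFramesN ((mfs - 2).toNat - 1) xs := by
  induction fuel with
  | zero =>
    intro xs mfs _ hlen
    have : xs = [] := List.eq_nil_of_length_eq_zero (by omega)
    subst this; simp [pvLoopA, pvFramesN]
  | succ fuel ih =>
    intro xs mfs hm hlen
    match xs with
    | [] => simp [pvLoopA, pvFramesN]
    | x :: rest =>
      obtain ⟨k, hk⟩ : ∃ k, (mfs - 2).toNat = k + 1 := ⟨(mfs - 2).toNat - 1, by omega⟩
      have hfs : (min ((x :: rest).length : Int) (mfs - 2)).toNat
          = min (x :: rest).length (mfs - 2).toNat := by omega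
      have hfs0 : (0 : Int) ≤ min ((x :: rest).length : Int) (mfs - 2) := by
        simp; omega
      rw [pvLoopA]
      simp only [List.isEmpty_cons, if_false, Bool.false_eq_true]
      rw [PySem.List.slice_to _ hfs0, PySem.List.slice_from _ hfs0, hfs,
        pv_take_min_length, pv_drop_min_length, hk]
      rw [List.take_succ_cons, List.drop_succ_cons, pv_framesN_cons]
      have hrest : (rest.drop k).length ≤ fuel := by
        simp only [List.length_drop, List.length_cons] at hlen ⊢; omega
      rw [ih (rest.drop k) mfs hm hrest, hk]
      simp

-- range(0, n, s) for 0 < n, 1 ≤ s starts at 0; the rest is range(0, n-s, s) shifted by s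
lemma pv_pyRange_shift (n s : Int) (hs : 1 ≤ s) (hn : 0 < n) :
    PySem.List.pyRange 0 n s = 0 :: (PySem.List.pyRange 0 (n - s) s).map (· + s) := by
  have hs0 : (0 : Int) < s := by omega
  rw [PySem.List.pyRange_of_pos _ _ hs0, PySem.List.pyRange_of_pos _ _ hs0]
  have hdiv : (n - 1 + 1 * s) / s = (n - 1) / s + 1 :=
    Int.add_mul_ediv_right (n - 1) 1 (by omega)
  have h1 : n + s - 1 = n - 1 + 1 * s := by ring
  have hdn : (0 : Int) ≤ (n - 1) / s := Int.ediv_nonneg (by omega) (by omega)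
  have hm : (if (0 : Int) < n then ((n - 0 + s - 1) / s).toNat else 0)
      = ((n - 1) / s).toNat + 1 := by
    rw [if_pos hn]; rw [show n - 0 + s - 1 = n - 1 + 1 * s by ring, hdiv]; omega
  have hm' : (if (0 : Int) < n - s then ((n - s - 0 + s - 1) / s).toNat else 0)
      = ((n - 1) / s).toNat := by
    by_cases hc : (0 : Int) < n - s
    · rw [if_pos hc]; rw [show n - s - 0 + s - 1 = n - 1 by ring]
    · rw [if_neg hc]
      have : (n - 1) / s = 0 := Int.ediv_eq_zero_of_lt (by omega) (by omega)
      omega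
  rw [hm, hm', List.range_succ_eq_map]
  simp only [List.map_cons, List.map_map]
  refine congrArg₂ List.cons (by simp) (List.map_congr_left ?_)
  intro a _
  simp [Function.comp]
  ring

lemma pvMapRange_eq_framesN (N : Nat) :
    ∀ (xs : List String) (s : Int), xs.length ≤ N → 1 ≤ s →
      (PySem.List.pyRange 0 (xs.length : Int) s).map
          (fun j => pvByteFlag :: PySem.List.slice xs (some j) (some (j + s)) ++ [pvByteFlag])
        = pvFramesN (s.toNat - 1) xs := by
  induction N with
  | zero =>
    intro xs s hlen _
    have : xs = [] := List.eq_nil_of_length_eq_zero (by omega)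
    subst this
    rw [pv_framesN_nil, PySem.List.pyRange_of_pos _ _ (by omega : (0:Int) < s)]
    simp
  | succ N ih =>
    intro xs s hlen hs
    match xs with
    | [] =>
      rw [pv_framesN_nil, PySem.List.pyRange_of_pos _ _ (by omega : (0:Int) < s)]
      simp
    | x :: rest =>
      obtain ⟨k, hk⟩ : ∃ k, s.toNat = k + 1 := ⟨s.toNat - 1, by omega⟩
      have hn : (0 : Int) < ((x :: rest).length : Int) := by exact_mod_cast Nat.succ_pos rest.length
      rw [pv_pyRange_shift _ s hs hn, List.map_cons, List.map_map]
      -- head frame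
      have hhead : PySem.List.slice (x :: rest) none (some s) = x :: rest.take k := by
        rw [PySem.List.slice_to _ (by omega : (0:Int) ≤ s), hk, List.take_succ_cons]
      -- tail frames: each slice starting at j+s is a slice of the dropped list
      have htail : ∀ j : Int, j ∈ PySem.List.pyRange 0 (((x :: rest).length : Int) - s) s →
          ((fun j => pvByteFlag :: PySem.List.slice (x :: rest) (some j) (some (j + s)) ++ [pvByteFlag]) ∘ (· + s)) j
            = (fun j => pvByteFlag :: PySem.List.slice (rest.drop k) (some j) (some (j + s)) ++ [pvByteFlag]) j := by
        intro j hj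
        have hj0 : 0 ≤ j := ((PySem.List.mem_pyRange_iff_of_pos (by omega : (0:Int) < s) j).mp hj).1
        simp only [Function.comp]
        have e1 : PySem.List.slice (x :: rest) (some (j + s)) (some (j + s + s))
            = PySem.List.slice (rest.drop k) (some j) (some (j + s)) := by
          rw [PySem.List.slice_toNat _ (by omega) (by omega),
            PySem.List.slice_toNat _ hj0 (by omega)]
          have h2 : (j + s + s).toNat - (j + s).toNat = (j + s).toNat - j.toNat := by omega
          have h3 : (j + s).toNat = s.toNat + j.toNat := by omega
          rw [h2, h3, ← List.drop_drop, hk, List.drop_succ_cons]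
        rw [e1]
      rw [List.map_congr_left htail]
      -- the remaining range is exactly the range over the dropped list's length
      have hlen' : (rest.drop k).length ≤ N := by
        simp only [List.length_drop, List.length_cons] at hlen ⊢; omega
      by_cases hc : s ≤ ((x :: rest).length : Int)
      · have hlx : (((rest.drop k).length : Int)) = ((x :: rest).length : Int) - s := by
          simp only [List.length_drop, List.length_cons] at hc ⊢; push_cast at hc ⊢; omega
        rw [← hlx, ih (rest.drop k) s hlen' hs, pv_framesN_cons]
        simp [hhead, hk]
      · have h1 : PySem.List.pyRange 0 (((x :: rest).length : Int) - s) s = [] := by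
          rw [PySem.List.pyRange_of_pos _ _ (by omega : (0:Int) < s), if_neg (by omega)]
          simp
        have h2 : rest.drop k = [] := by
          apply List.drop_eq_nil_of_le
          simp only [List.length_cons, not_le] at hc; push_cast at hc; omega
        rw [h1, pv_framesN_cons, show s.toNat - 1 = k by omega, h2, pv_framesN_nil]
        simp [hhead]

-- the two ports build the same bytes_list (slice commutes with map)
lemma pv_bytes_eq (bits : List Int) :
    (PySem.List.pyRange 0 ((bits.map PySem.Int.toStr).length : Int) 8).map
        (fun i => PySem.Str.join "" (PySem.List.slice (bits.map PySem.Int.toStr) (some i) (some (i + 8))))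
      = (PySem.List.pyRange 0 (bits.length : Int) 8).map
        (fun i => PySem.Str.join "" ((PySem.List.slice bits (some i) (some (i + 8))).map PySem.Int.toStr)) := by
  rw [List.length_map]
  apply List.map_congr_left
  intro i hi
  have hi0 : 0 ≤ i := ((PySem.List.mem_pyRange_iff_of_pos (by omega : (0:Int) < 8) i).mp hi).1
  rw [PySem.List.slice_toNat _ hi0 (by omega), PySem.List.slice_toNat _ hi0 (by omega)]
  rw [← List.map_drop, ← List.map_take]

-- ===== VERDICT (by name: the statement is the Claim_ definition above) =====
theorem bytes_insertion_framing_spec : Claim_equal_bytes_insertion_framing := by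
  intro bits mfs _ hpre
  unfold Spec_bytes_insertion_framing bytes_insertion_framing bytes_insertion_framing_alt
  simp only []
  rw [pv_bytes_eq]
  set bl := (PySem.List.pyRange 0 (bits.length : Int) 8).map
    (fun i => PySem.Str.join "" ((PySem.List.slice bits (some i) (some (i + 8))).map PySem.Int.toStr)) with hbl
  by_cases hb : bl.isEmpty
  · rw [if_pos hb]
    have : bl = [] := List.isEmpty_iff.mp hb
    rw [this]; rfl
  · rw [if_neg hb]
    have hmfs : 3 ≤ mfs := by
      rcases hpre with h | h
      · exfalso; apply hb; rw [hbl, h]; rfl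
      · exact h
    rw [pvLoopA_eq_framesN bl.length bl mfs hmfs le_rfl,
      pvMapRange_eq_framesN bl.length bl (mfs - 2) le_rfl (by omega)]
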